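-- pv_equiv track=rewrite | github.com/Gokul-VS-Kannan/Array_Practice | bubble sort/even_number_sort.py | even_number_sort
-- ===== SOURCE A (Python) =====
-- def even_number_sort(arr):
--     n = len(arr)
--     for i in range(n-1):
--         if arr[i]%2==0:
--             for j in range(i+1,n):
--                 if arr[j]%2==0 and arr[j] < arr[i]:
--                      arr[i], arr[j] = arr[j], arr[i]
--     return arr
-- ===== SOURCE B (Python) =====
-- def even_number_sort(arr):
--     evens = iter(sorted(x for x in arr if x % 2 == 0))
--     for i, x in enumerate(arr):
--         if x % 2 == 0:
--             arr[i] = next(evens)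
--     return arr
-- ===== Notes on version B (the rewrite author's own statement) =====
-- stated objective: alternative
-- what changed: A selection-sorts the even elements in place with two nested index loops; B extracts the even values, sorts them once with sorted(), and writes them back onto the even positions in one enumerate pass.
import Mathlib
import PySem

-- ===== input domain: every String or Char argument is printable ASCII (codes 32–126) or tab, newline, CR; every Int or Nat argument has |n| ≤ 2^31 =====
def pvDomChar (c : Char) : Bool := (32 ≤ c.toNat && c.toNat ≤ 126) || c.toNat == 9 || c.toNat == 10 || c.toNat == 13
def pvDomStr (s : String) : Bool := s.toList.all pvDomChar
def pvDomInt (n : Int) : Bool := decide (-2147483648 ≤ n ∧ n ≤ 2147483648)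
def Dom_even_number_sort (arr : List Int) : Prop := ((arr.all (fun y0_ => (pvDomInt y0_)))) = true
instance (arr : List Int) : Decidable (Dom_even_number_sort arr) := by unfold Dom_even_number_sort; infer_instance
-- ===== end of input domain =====

-- B replaces A's in-place double-loop selection of evens by "sort the even values once, write them
-- back onto the even positions" (objective: alternative). Both Pythons mutate `arr` in place the
-- same way; the equivalence proved here is about the returned value.

-- ===== PORT A =====
-- indices produced by range are nonnegative and in bounds, so `arr[i]` is `getD`/`set` at `i.toNat` exactly
def even_number_sort (arr : List Int) : List Int :=
  (PySem.List.pyRange 0 ((arr.length : Int) - 1) 1).foldl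
    (fun l i =>
      if PySem.Int.mod (PySem.List.pyGetD l i 0) 2 == 0 then
        (PySem.List.pyRange (i + 1) (arr.length : Int) 1).foldl
          (fun l' j =>
            if PySem.Int.mod (PySem.List.pyGetD l' j 0) 2 == 0 ∧
                PySem.List.pyGetD l' j 0 < PySem.List.pyGetD l' i 0 then
              -- arr[i], arr[j] = arr[j], arr[i]
              (l'.set i.toNat (PySem.List.pyGetD l' j 0)).set j.toNat (PySem.List.pyGetD l' i 0)
            else l') l
      else l) arr

-- ===== PORT B =====
-- the `for i, x in enumerate(arr): if x % 2 == 0: arr[i] = next(evens)` loop of Source B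
def fillEvens : List Int → List Int → List Int
  | [], _ => []
  | x :: xs, es =>
    if PySem.Int.mod x 2 == 0 then
      match es with
      | e :: es' => e :: fillEvens xs es'
      | [] => x :: fillEvens xs []   -- never reached: es holds exactly one value per even slot
    else x :: fillEvens xs es

def even_number_sort_alt (arr : List Int) : List Int :=
  fillEvens arr (PySem.List.sorted (arr.filter (fun x => PySem.Int.mod x 2 == 0)) (fun x => x) false)

-- ===== PRECONDITION & SPEC =====
def Spec_even_number_sort (arr : List Int) (out : List Int) : Prop := out = even_number_sort_alt arr
instance (arr : List Int) (out : List Int) : Decidable (Spec_even_number_sort arr out) := by unfold Spec_even_number_sort; infer_instance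

-- ===== CLAIM (what is proved, stated in full; the proofs are below) =====
def Claim_equal_even_number_sort : Prop := ∀ (arr : List Int), Dom_even_number_sort arr → Spec_even_number_sort arr (even_number_sort arr)

-- ===== LEMMAS AND PROOFS =====

-- "x is even" as A's and B's guards compute it
def pvEv (x : Int) : Bool := PySem.Int.mod x 2 == 0
def pvEvens (l : List Int) : List Int := l.filter pvEv

-- Nat-indexed model of A's loops (proved equal to the port below)
def pvSwap (l : List Int) (i j : Nat) : List Int := (l.set i (l.getD j 0)).set j (l.getD i 0)

def pvInnerStep (i : Nat) (l : List Int) (j : Nat) : List Int :=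
  if pvEv (l.getD j 0) ∧ l.getD j 0 < l.getD i 0 then pvSwap l i j else l

def pvOuterStep (n : Nat) (l : List Int) (i : Nat) : List Int :=
  if pvEv (l.getD i 0) then (List.range' (i + 1) (n - (i + 1))).foldl (pvInnerStep i) l else l

def pvModel (arr : List Int) : List Int :=
  (List.range' 0 (arr.length - 1)).foldl (pvOuterStep arr.length) arr

-- getD/set bookkeeping
theorem pv_getD_set_self (l : List Int) (i : Nat) (a : Int) (h : i < l.length) :
    (l.set i a).getD i 0 = a := by
  simp [List.getD_eq_getElem?_getD, h]

theorem pv_getD_set_ne (l : List Int) (i k : Nat) (a : Int) (h : i ≠ k) :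
    (l.set i a).getD k 0 = l.getD k 0 := by
  simp [List.getD_eq_getElem?_getD, h]

theorem pvSwap_length (l : List Int) (i j : Nat) : (pvSwap l i j).length = l.length := by
  simp [pvSwap]

theorem pvSwap_getD_i (l : List Int) (i j : Nat) (hij : i < j) (hi : i < l.length) :
    (pvSwap l i j).getD i 0 = l.getD j 0 := by
  unfold pvSwap
  rw [pv_getD_set_ne _ _ _ _ (Nat.ne_of_gt hij), pv_getD_set_self _ _ _ hi]

theorem pvSwap_getD_j (l : List Int) (i j : Nat) (hj : j < l.length) :
    (pvSwap l i j).getD j 0 = l.getD i 0 := by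
  unfold pvSwap
  rw [pv_getD_set_self]
  simpa using hj

theorem pvSwap_getD_other (l : List Int) (i j k : Nat) (hki : k ≠ i) (hkj : k ≠ j) :
    (pvSwap l i j).getD k 0 = l.getD k 0 := by
  unfold pvSwap
  rw [pv_getD_set_ne _ _ _ _ (Ne.symm hkj), pv_getD_set_ne _ _ _ _ (Ne.symm hki)]

-- swapping two positions is a permutation
theorem pv_cons_set_perm (t : List Int) (m : Nat) (a : Int) (hm : m < t.length) :
    (t.getD m 0 :: t.set m a).Perm (a :: t) := by
  induction t generalizing m with
  | nil => simp at hm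
  | cons c t' ih =>
    cases m with
    | zero => simpa using List.Perm.swap a c t'
    | succ m' =>
      have hm' : m' < t'.length := by simpa using hm
      show (t'.getD m' 0 :: c :: t'.set m' a).Perm (a :: c :: t')
      exact ((List.Perm.swap c (t'.getD m' 0) (t'.set m' a)).trans
        (List.Perm.cons c (ih m' hm'))).trans (List.Perm.swap a c t')

theorem pvSwap_perm (l : List Int) (i j : Nat) (hij : i < j) (hj : j < l.length) :
    (pvSwap l i j).Perm l := by
  induction l generalizing i j with
  | nil => simp at hj
  | cons a t ih =>
    cases i with
    | zero =>
      obtain ⟨j', rfl⟩ : ∃ j', j = j' + 1 := ⟨j - 1, by omega⟩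
      have hj' : j' < t.length := by simpa using hj
      have : pvSwap (a :: t) 0 (j' + 1) = t.getD j' 0 :: t.set j' a := by
        simp [pvSwap]
      rw [this]
      exact pv_cons_set_perm t j' a hj'
    | succ i' =>
      obtain ⟨j', rfl⟩ : ∃ j', j = j' + 1 := ⟨j - 1, by omega⟩
      have : pvSwap (a :: t) (i' + 1) (j' + 1) = a :: pvSwap t i' j' := by
        simp [pvSwap]
      rw [this]
      exact List.Perm.cons a (ih i' j' (by omega) (by simpa using hj))

theorem pvSwap_take (l : List Int) (i j k : Nat) (hki : k ≤ i) (hkj : k ≤ j) :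
    (pvSwap l i j).take k = l.take k := by
  unfold pvSwap
  rw [List.take_set, List.take_set]
  rw [List.set_eq_of_length_le, List.set_eq_of_length_le] <;>
    simp [List.length_take] <;> omega

-- a permutation that fixes a prefix permutes the corresponding suffix
theorem pv_drop_perm_of_perm_take_eq (l' l : List Int) (k : Nat)
    (hp : l'.Perm l) (ht : l'.take k = l.take k) :
    (l'.drop k).Perm (l.drop k) := by
  have h1 : l'.take k ++ l'.drop k = l' := List.take_append_drop k l'
  have h2 : l.take k ++ l.drop k = l := List.take_append_drop k l
  rw [← h1, ← h2, ht] at hp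
  exact (List.perm_append_left_iff _).mp hp

theorem pv_getD_eq_of_take_eq (l' l : List Int) (k p : Nat)
    (ht : l'.take k = l.take k) (hp : p < k) : l'.getD p 0 = l.getD p 0 := by
  have := congrArg (fun t => t.getD p 0) ht
  simpa [List.getD_eq_getElem?_getD, List.getElem?_take, hp] using this

-- ===== the inner loop: after it, position i holds a lower bound of the even values scanned =====
theorem pvInner_spec (i : Nat) : ∀ (m s : Nat) (l : List Int),
    i < s → s + m ≤ l.length →
    (∀ q, i < q → q < s → pvEv (l.getD q 0) = true → l.getD i 0 ≤ l.getD q 0) →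
    pvEv (l.getD i 0) = true →
    ((List.range' s m).foldl (pvInnerStep i) l).length = l.length ∧
    ((List.range' s m).foldl (pvInnerStep i) l).take i = l.take i ∧
    ((List.range' s m).foldl (pvInnerStep i) l).Perm l ∧
    (∀ k, pvEv (((List.range' s m).foldl (pvInnerStep i) l).getD k 0) = pvEv (l.getD k 0)) ∧
    (∀ k, pvEv (l.getD k 0) = false →
      ((List.range' s m).foldl (pvInnerStep i) l).getD k 0 = l.getD k 0) ∧
    pvEv (((List.range' s m).foldl (pvInnerStep i) l).getD i 0) = true ∧
    (∀ q, i < q → q < s + m → pvEv (((List.range' s m).foldl (pvInnerStep i) l).getD q 0) = true →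
      ((List.range' s m).foldl (pvInnerStep i) l).getD i 0 ≤
        ((List.range' s m).foldl (pvInnerStep i) l).getD q 0) := by
  intro m
  induction m with
  | zero =>
    intro s l his hlen hinv hev
    refine ⟨rfl, rfl, List.Perm.refl _, fun k => rfl, fun k _ => rfl, hev, ?_⟩
    simpa using hinv
  | succ m ih =>
    intro s l his hlen hinv hev
    rw [List.range'_succ, List.foldl_cons]
    have hs : s < l.length := by omega
    have hi : i < l.length := by omega
    by_cases hg : pvEv (l.getD s 0) ∧ l.getD s 0 < l.getD i 0
    · -- swap happens
      have hstep : pvInnerStep i l s = pvSwap l i s := by unfold pvInnerStep; rw [if_pos hg]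
      rw [hstep]
      have hlen1 : (pvSwap l i s).length = l.length := pvSwap_length l i s
      have hgi : (pvSwap l i s).getD i 0 = l.getD s 0 := pvSwap_getD_i l i s his hi
      have hgs : (pvSwap l i s).getD s 0 = l.getD i 0 := pvSwap_getD_j l i s hs
      have hgo : ∀ k, k ≠ i → k ≠ s → (pvSwap l i s).getD k 0 = l.getD k 0 :=
        fun k h1 h2 => pvSwap_getD_other l i s k h1 h2
      have hinv1 : ∀ q, i < q → q < s + 1 → pvEv ((pvSwap l i s).getD q 0) = true →
          (pvSwap l i s).getD i 0 ≤ (pvSwap l i s).getD q 0 := by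
        intro q hq1 hq2 hqe
        rcases Nat.lt_or_ge q s with hqs | hqs
        · have hne1 : q ≠ i := by omega
          have hne2 : q ≠ s := by omega
          rw [hgi, hgo q hne1 hne2]
          rw [hgo q hne1 hne2] at hqe
          exact le_of_lt (lt_of_lt_of_le hg.2 (hinv q hq1 hqs hqe))
        · have hq : q = s := by omega
          subst hq
          rw [hgi, hgs]
          exact le_of_lt hg.2
      obtain ⟨c1, c2, c3, c4, c5, c6, c7⟩ :=
        ih (s + 1) (pvSwap l i s) (by omega) (by omega)
          (fun q h1 h2 he => hinv1 q h1 (by omega) he)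
          (by rw [hgi]; exact hg.1)
      refine ⟨c1.trans hlen1, ?_, c3.trans (pvSwap_perm l i s his hs), ?_, ?_, c6, ?_⟩
      · rw [c2, pvSwap_take l i s i (le_refl i) (le_of_lt his)]
      · intro k
        rw [c4 k]
        by_cases hki : k = i
        · subst hki; rw [hgi, hg.1, hev]
        · by_cases hks : k = s
          · subst hks; rw [hgs, hg.1, hev]
          · rw [hgo k hki hks]
      · intro k hk
        have hki : k ≠ i := by intro h; subst h; rw [hev] at hk; exact absurd hk (by simp)
        have hks : k ≠ s := by intro h; subst h; rw [hg.1] at hk; exact absurd hk (by simp)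
        rw [c5 k (by rw [hgo k hki hks]; exact hk), hgo k hki hks]
      · intro q h1 h2 h3
        exact c7 q h1 (by omega) h3
    · -- no swap
      have hstep : pvInnerStep i l s = l := by unfold pvInnerStep; rw [if_neg hg]
      rw [hstep]
      have hinv1 : ∀ q, i < q → q < s + 1 → pvEv (l.getD q 0) = true →
          l.getD i 0 ≤ l.getD q 0 := by
        intro q hq1 hq2 he
        rcases Nat.lt_or_ge q s with hqs | hqs
        · exact hinv q hq1 hqs he
        · have hq : q = s := by omega
          subst hq
          by_contra hlt
          exact hg ⟨he, by omega⟩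
      obtain ⟨c1, c2, c3, c4, c5, c6, c7⟩ := ih (s + 1) l (by omega) (by omega) hinv1 hev
      exact ⟨c1, c2, c3, c4, c5, c6, fun q h1 h2 h3 => c7 q h1 (by omega) h3⟩

-- the outer-loop invariant: every already-placed even value bounds the evens after it
def pvOInv (i : Nat) (l : List Int) : Prop :=
  ∀ p, p < i → pvEv (l.getD p 0) = true → ∀ x ∈ pvEvens (l.drop (p + 1)), l.getD p 0 ≤ x

theorem pv_mem_evens_drop (l : List Int) (t : Nat) (x : Int) :
    x ∈ pvEvens (l.drop t) ↔ ∃ q, t ≤ q ∧ q < l.length ∧ l.getD q 0 = x ∧ pvEv x = true := by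
  constructor
  · intro hx
    rw [pvEvens, List.mem_filter] at hx
    obtain ⟨hm, he⟩ := hx
    obtain ⟨u, hu, hux⟩ := List.mem_iff_getElem.mp hm
    refine ⟨t + u, by omega, ?_, ?_, he⟩
    · have := hu; rw [List.length_drop] at this; omega
    · have hq : t + u < l.length := by have := hu; rw [List.length_drop] at this; omega
      rw [List.getD_eq_getElem l 0 hq, ← hux, List.getElem_drop]
  · rintro ⟨q, h1, h2, rfl, he⟩
    rw [pvEvens, List.mem_filter]
    refine ⟨?_, he⟩
    have hq : q - t < (l.drop t).length := by rw [List.length_drop]; omega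
    have : (l.drop t)[q - t] = l.getD q 0 := by
      rw [List.getElem_drop, List.getD_eq_getElem l 0 h2]
      congr 1; omega
    rw [← this]
    exact List.getElem_mem hq

-- ===== the outer loop =====
theorem pvOuter_spec (arr : List Int) : ∀ (m i : Nat) (l : List Int),
    l.length = arr.length → i + m ≤ arr.length →
    (∀ k, pvEv (l.getD k 0) = pvEv (arr.getD k 0)) →
    (∀ k, pvEv (arr.getD k 0) = false → l.getD k 0 = arr.getD k 0) →
    (pvEvens l).Perm (pvEvens arr) →
    pvOInv i l →
    ((List.range' i m).foldl (pvOuterStep arr.length) l).length = arr.length ∧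
    (∀ k, pvEv (((List.range' i m).foldl (pvOuterStep arr.length) l).getD k 0) = pvEv (arr.getD k 0)) ∧
    (∀ k, pvEv (arr.getD k 0) = false →
      ((List.range' i m).foldl (pvOuterStep arr.length) l).getD k 0 = arr.getD k 0) ∧
    (pvEvens ((List.range' i m).foldl (pvOuterStep arr.length) l)).Perm (pvEvens arr) ∧
    pvOInv (i + m) ((List.range' i m).foldl (pvOuterStep arr.length) l) := by
  intro m
  induction m with
  | zero => intro i l h1 h2 h3 h4 h5 h6; exact ⟨h1, h3, h4, h5, by simpa using h6⟩
  | succ m ih =>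
    intro i l hlen him hpar hodd hperm hoinv
    rw [List.range'_succ, List.foldl_cons]
    by_cases hg : pvEv (l.getD i 0) = true
    · have hstep : pvOuterStep arr.length l i =
          (List.range' (i + 1) (arr.length - (i + 1))).foldl (pvInnerStep i) l := by
        simp only [pvOuterStep]; rw [if_pos hg]
      rw [hstep]
      have hin : i + 1 + (arr.length - (i + 1)) ≤ l.length := by omega
      obtain ⟨c1, c2, c3, c4, c5, c6, c7⟩ :=
        pvInner_spec i (arr.length - (i + 1)) (i + 1) l (by omega) hin
          (by intro q hq1 hq2 _; omega) hg
      set l2 := (List.range' (i + 1) (arr.length - (i + 1))).foldl (pvInnerStep i) l with hl2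
      have hlen2 : l2.length = arr.length := c1.trans hlen
      have hpar2 : ∀ k, pvEv (l2.getD k 0) = pvEv (arr.getD k 0) := fun k => (c4 k).trans (hpar k)
      have hodd2 : ∀ k, pvEv (arr.getD k 0) = false → l2.getD k 0 = arr.getD k 0 := by
        intro k hk
        have hlk : pvEv (l.getD k 0) = false := (hpar k).trans hk
        rw [c5 k hlk]; exact hodd k hk
      have hperm2 : (pvEvens l2).Perm (pvEvens arr) := (c3.filter pvEv).trans hperm
      have hoinv2 : pvOInv (i + 1) l2 := by
        intro p hp hpe x hx
        rcases Nat.lt_or_ge p i with hpi | hpi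
        · -- positions strictly below i: value unchanged, suffix permuted
          have hgp : l2.getD p 0 = l.getD p 0 := pv_getD_eq_of_take_eq l2 l i p c2 hpi
          have ht : l2.take (p + 1) = l.take (p + 1) := by
            have h1 : l2.take (p + 1) = (l2.take i).take (p + 1) := by
              rw [List.take_take]; congr 1; omega
            have h2 : l.take (p + 1) = (l.take i).take (p + 1) := by
              rw [List.take_take]; congr 1; omega
            rw [h1, h2, c2]
          have hdp : (l2.drop (p + 1)).Perm (l.drop (p + 1)) :=
            pv_drop_perm_of_perm_take_eq l2 l (p + 1) c3 ht
          have hx' : x ∈ pvEvens (l.drop (p + 1)) :=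
            (List.Perm.mem_iff (hdp.filter pvEv)).mp hx
          rw [hgp]
          exact hoinv p hpi (by rw [← hgp]; exact hpe) x hx'
        · have hpi' : p = i := by omega
          subst hpi'
          obtain ⟨q, hq1, hq2, hq3, hq4⟩ := (pv_mem_evens_drop l2 (p + 1) x).mp hx
          rw [← hq3]
          exact c7 q (by omega) (by omega) (by rw [hq3]; exact hq4)
      obtain ⟨d1, d2, d3, d4, d5⟩ := ih (i + 1) l2 hlen2 (by omega) hpar2 hodd2 hperm2 hoinv2
      exact ⟨d1, d2, d3, d4, by have := d5; simpa [Nat.add_assoc, Nat.add_comm, Nat.add_left_comm] using this⟩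
    · have hstep : pvOuterStep arr.length l i = l := by
        simp only [pvOuterStep]; rw [if_neg hg]
      rw [hstep]
      have hoinv2 : pvOInv (i + 1) l := by
        intro p hp hpe x hx
        rcases Nat.lt_or_ge p i with hpi | hpi
        · exact hoinv p hpi hpe x hx
        · have : p = i := by omega
          subst this
          rw [hpe] at hg; exact absurd rfl hg
      obtain ⟨d1, d2, d3, d4, d5⟩ := ih (i + 1) l hlen (by omega) hpar hodd hperm hoinv2
      exact ⟨d1, d2, d3, d4, by simpa [Nat.add_assoc, Nat.add_comm, Nat.add_left_comm] using d5⟩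

-- the final invariant makes the list of even values sorted
theorem pv_pairwise_of_oinv : ∀ (l : List Int),
    (∀ p, pvEv (l.getD p 0) = true → ∀ x ∈ pvEvens (l.drop (p + 1)), l.getD p 0 ≤ x) →
    (pvEvens l).Pairwise (· ≤ ·) := by
  intro l
  induction l with
  | nil => intro _; simp [pvEvens]
  | cons a t ih =>
    intro h
    by_cases ha : pvEv a = true
    · have h0 := h 0 (by simpa using ha)
      simp only [List.getD_cons_zero, List.drop_succ_cons, List.drop_zero] at h0
      have ht : (pvEvens t).Pairwise (· ≤ ·) := by
        apply ih
        intro p hp x hx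
        have := h (p + 1) (by simpa using hp) x (by simpa using hx)
        simpa using this
      have he : pvEvens (a :: t) = a :: pvEvens t := by simp [pvEvens, ha]
      rw [he]
      exact List.Pairwise.cons h0 ht
    · have he : pvEvens (a :: t) = pvEvens t := by
        simp [pvEvens, ha]
      rw [he]
      apply ih
      intro p hp x hx
      have := h (p + 1) (by simpa using hp) x (by simpa using hx)
      simpa using this

-- B's write-back loop reconstructs any list with arr's shape from its even values
theorem pv_fill_shape : ∀ (arr l : List Int),
    l.length = arr.length →
    (∀ k, pvEv (l.getD k 0) = pvEv (arr.getD k 0)) →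
    (∀ k, pvEv (arr.getD k 0) = false → l.getD k 0 = arr.getD k 0) →
    fillEvens arr (pvEvens l) = l := by
  intro arr
  induction arr with
  | nil =>
    intro l hlen _ _
    have h : l = [] := by simpa using hlen
    subst h; rfl
  | cons a arr' ih =>
    intro l hlen hpar hodd
    obtain ⟨b, t, rfl⟩ : ∃ b t, l = b :: t := by
      cases l with
      | nil => simp at hlen
      | cons b t => exact ⟨b, t, rfl⟩
    have hlen' : t.length = arr'.length := by simpa using hlen
    have hpar' : ∀ k, pvEv (t.getD k 0) = pvEv (arr'.getD k 0) := fun k => by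
      simpa using hpar (k + 1)
    have hodd' : ∀ k, pvEv (arr'.getD k 0) = false → t.getD k 0 = arr'.getD k 0 := fun k hk => by
      simpa using hodd (k + 1) (by simpa using hk)
    have h0 := hpar 0
    simp only [List.getD_cons_zero] at h0
    by_cases ha : pvEv a = true
    · have hb : pvEv b = true := by rw [h0]; exact ha
      have hfe : pvEvens (b :: t) = b :: pvEvens t := by simp [pvEvens, hb]
      rw [hfe]
      show fillEvens (a :: arr') (b :: pvEvens t) = b :: t
      have ha' : (PySem.Int.mod a 2 == 0) = true := ha
      rw [fillEvens.eq_def]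
      simp only [ha', if_true]
      rw [ih t hlen' hpar' hodd']
    · have hb : pvEv b = false := by rw [h0]; simpa using ha
      have hba : b = a := by
        have := hodd 0 (by simpa using ha)
        simpa using this
      have hfe : pvEvens (b :: t) = pvEvens t := by simp [pvEvens, hb]
      rw [hfe]
      show fillEvens (a :: arr') (pvEvens t) = b :: t
      have ha' : (PySem.Int.mod a 2 == 0) = false := by simpa [pvEv] using ha
      rw [fillEvens.eq_def]
      simp only [ha', Bool.false_eq_true, if_false]
      rw [ih t hlen' hpar' hodd', hba]

-- ===== the port of A computes the model =====
theorem pv_portA_eq_model (arr : List Int) : even_number_sort arr = pvModel arr := by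
  unfold even_number_sort pvModel
  rw [PySem.List.pyRange_one, List.foldl_map, List.range'_eq_map_range, List.foldl_map]
  have hn : (((arr.length : Int) - 1) - 0).toNat = arr.length - 1 := by omega
  rw [hn]
  apply PySem.List.foldl_congr_mem
  intro l k _
  simp only [Nat.zero_add]
  have hcast : (0 : Int) + (k : Int) = ((k : Nat) : Int) := by ring
  rw [hcast, PySem.List.pyGetD_natCast]
  show (if (PySem.Int.mod (l.getD k 0) 2 == 0) = true then _ else l) = pvOuterStep arr.length l k
  unfold pvOuterStep pvEv
  by_cases hg : (PySem.Int.mod (l.getD k 0) 2 == 0) = true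
  · simp only [hg, if_true]
    rw [PySem.List.pyRange_one, List.foldl_map, List.range'_eq_map_range, List.foldl_map]
    have hm : (((arr.length : Int)) - ((k : Int) + 1)).toNat = arr.length - (k + 1) := by omega
    rw [hm]
    apply PySem.List.foldl_congr_mem
    intro l' u _
    have hc1 : (k : Int) + 1 + (u : Int) = ((k + 1 + u : Nat) : Int) := by push_cast; ring
    rw [hc1, PySem.List.pyGetD_natCast, PySem.List.pyGetD_natCast]
    show (if (PySem.Int.mod (l'.getD (k+1+u) 0) 2 == 0) = true ∧ l'.getD (k+1+u) 0 < l'.getD k 0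
          then (l'.set ((k:Int)).toNat (l'.getD (k+1+u) 0)).set (((k+1+u : Nat) : Int)).toNat (l'.getD k 0)
          else l') = pvInnerStep k l' (k + 1 + u)
    unfold pvInnerStep pvEv pvSwap
    simp only [Int.toNat_natCast]
  · have hg' : ¬ 2 ∣ (l[k]?.getD 0) := by
      rw [← List.getD_eq_getElem?_getD, ← PySem.Int.mod_eq_zero_iff_dvd]; simpa using hg
    simp [hg']

-- ===== assembly =====
theorem pv_main (arr : List Int) : even_number_sort arr = even_number_sort_alt arr := by
  rw [pv_portA_eq_model]
  have hL : pvModel arr = (List.range' 0 (arr.length - 1)).foldl (pvOuterStep arr.length) arr := rfl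
  rw [hL]
  set l' := (List.range' 0 (arr.length - 1)).foldl (pvOuterStep arr.length) arr with hl'
  obtain ⟨d1, d2, d3, d4, d5⟩ :=
    pvOuter_spec arr (arr.length - 1) 0 arr rfl (by omega)
      (fun k => rfl) (fun k _ => rfl) (List.Perm.refl _) (by intro p hp; omega)
  rw [← hl'] at d1 d2 d3 d4 d5
  have hoinv : ∀ p, pvEv (l'.getD p 0) = true → ∀ x ∈ pvEvens (l'.drop (p + 1)), l'.getD p 0 ≤ x := by
    intro p hpe x hx
    rcases Nat.lt_or_ge p (arr.length - 1) with hp | hp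
    · exact d5 p (by omega) hpe x hx
    · -- beyond the processed prefix the suffix of evens is empty
      obtain ⟨q, hq1, hq2, _, _⟩ := (pv_mem_evens_drop l' (p + 1) x).mp hx
      rw [d1] at hq2
      omega
  have hpair : (pvEvens l').Pairwise (· ≤ ·) := pv_pairwise_of_oinv l' hoinv
  have hsorted : PySem.List.sorted (pvEvens arr) (fun x => x) false = pvEvens l' :=
    PySem.List.sorted_id_eq_of_perm_of_pairwise _ _ d4 hpair
  have hfilt : arr.filter (fun x => PySem.Int.mod x 2 == 0) = pvEvens arr := rfl
  unfold even_number_sort_alt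
  rw [hfilt, hsorted]
  exact (pv_fill_shape arr l' d1 d2 d3).symm

-- ===== VERDICT (by name: the statement is the Claim_ definition above) =====
theorem even_number_sort_spec : Claim_equal_even_number_sort := by
  intro arr _
  unfold Spec_even_number_sort
  exact pv_main arr
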